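-- pv_equiv track=rewrite | github.com/nbbeom/Algorithms | 카펫.py | solution
-- ===== SOURCE A (Python) =====
-- def solution(brown, yellow):
--     n = brown + yellow
--     a = []
--     for i in range(1,n+1):
--         if n%i == 0:
--             a.append(i)
--
--     if len(a) % 2 == 0:
--         b = int(len(a)/2)
--         return [a[b],a[b-1]]
--
--     else:
--         b = int(len(a)/2-1/2)
--         return [a[b],a[b]]
-- ===== SOURCE B (Python) =====
-- def solution(brown, yellow):
--     n = brown + yellow
--     d = 1
--     i = 1
--     while i * i <= n:
--         if n % i == 0:
--             d = i
--         i += 1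
--     return [n // d, d]
-- ===== Notes on version B (the rewrite author's own statement) =====
-- stated objective: faster
-- what changed: instead of building the full list of all divisors of n=brown+yellow by trial division up to n and indexing its middle, B scans only up to sqrt(n) keeping the largest divisor d with d*d <= n and returns [n//d, d] directly
-- outside the precondition, e.g. on solution(0, 0): A raises IndexError, B returns [0, 1]
import Mathlib
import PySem

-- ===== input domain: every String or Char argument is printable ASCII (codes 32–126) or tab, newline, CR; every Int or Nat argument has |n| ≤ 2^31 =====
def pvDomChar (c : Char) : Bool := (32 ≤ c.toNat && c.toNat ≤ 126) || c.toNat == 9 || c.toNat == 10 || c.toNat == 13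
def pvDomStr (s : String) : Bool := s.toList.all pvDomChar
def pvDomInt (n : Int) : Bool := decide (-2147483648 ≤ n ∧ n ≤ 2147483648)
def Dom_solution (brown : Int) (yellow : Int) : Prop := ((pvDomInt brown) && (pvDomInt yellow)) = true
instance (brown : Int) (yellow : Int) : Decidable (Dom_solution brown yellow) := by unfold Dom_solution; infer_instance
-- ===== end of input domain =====

-- B replaces A's full O(n) divisor-list build + middle indexing by a scan up to sqrt(n)
-- keeping the largest divisor d with d*d ≤ n, returning [n // d, d] (asymptotically faster).

-- ===== PORT A =====
def solution (brown : Int) (yellow : Int) : List Int :=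
  let n := brown + yellow
  let a := (PySem.List.pyRange 1 (n + 1) 1).foldl
    (fun acc i => if PySem.Int.mod n i == 0 then acc ++ [i] else acc) []
  if (a.length : Int) % 2 == 0 then
    -- int(len(a)/2): len(a) < 2^53, so the float division is exact and equals len(a) / 2
    let b : Int := (a.length : Int) / 2
    [(PySem.List.pyGet? a b).getD 0, (PySem.List.pyGet? a (b - 1)).getD 0]
  else
    -- int(len(a)/2 - 1/2): for odd len(a) < 2^53 this is exactly (len(a) - 1) / 2
    let b : Int := ((a.length : Int) - 1) / 2
    [(PySem.List.pyGet? a b).getD 0, (PySem.List.pyGet? a b).getD 0]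

-- ===== PORT B =====
-- the 'while i * i <= n' loop of Source B; terminates since i*i ≤ n forces i ≤ n
def altLoop (n : Int) (i : Int) (d : Int) : Int :=
  if h : i * i ≤ n then
    altLoop n (i + 1) (if PySem.Int.mod n i == 0 then i else d)
  else d
termination_by (n + 1 - i).toNat
decreasing_by
  have hin : i ≤ n := by nlinarith [sq_nonneg i, sq_nonneg (i - 1)]
  omega

def solution_alt (brown : Int) (yellow : Int) : List Int :=
  let n := brown + yellow
  let d := altLoop n 1 1
  [PySem.Int.floordiv n d, d]

-- ===== PRECONDITION & SPEC =====
-- A raises IndexError when brown + yellow ≤ 0 (the divisor list is empty and a[0] is read)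
def Pre_solution (brown : Int) (yellow : Int) : Prop := 1 ≤ brown + yellow
instance (brown : Int) (yellow : Int) : Decidable (Pre_solution brown yellow) := by
  unfold Pre_solution; infer_instance
def pvWitness_solution : Int × Int := (8, 1)
def Spec_solution (brown : Int) (yellow : Int) (out : List Int) : Prop := out = solution_alt brown yellow
instance (brown : Int) (yellow : Int) (out : List Int) : Decidable (Spec_solution brown yellow out) := by unfold Spec_solution; infer_instance

-- ===== CLAIM (what is proved, stated in full; the proofs are below) =====
def Claim_equal_solution : Prop := ∀ (brown : Int) (yellow : Int), Dom_solution brown yellow → Pre_solution brown yellow → Spec_solution brown yellow (solution brown yellow)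


-- ===== LEMMAS AND PROOFS =====

-- the divisor list A builds (fold = filter)
def pvD (n : Int) : List Int :=
  (PySem.List.pyRange 1 (n + 1) 1).filter (fun i => PySem.Int.mod n i == 0)

lemma pvD_fold (n : Int) :
    (PySem.List.pyRange 1 (n + 1) 1).foldl
      (fun acc i => if PySem.Int.mod n i == 0 then acc ++ [i] else acc) [] = pvD n := by
  simpa [pvD] using
    PySem.List.foldl_append_if_eq_filter (l := PySem.List.pyRange 1 (n + 1) 1)
      (p := fun i => PySem.Int.mod n i == 0) (acc := [])

lemma mem_pvD {n x : Int} (hn : 1 ≤ n) : x ∈ pvD n ↔ 1 ≤ x ∧ x ∣ n := by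
  simp only [pvD, List.mem_filter, PySem.List.mem_pyRange_one, beq_iff_eq,
    PySem.Int.mod_eq_zero_iff_dvd]
  constructor
  · rintro ⟨⟨h1, _⟩, h3⟩; exact ⟨h1, h3⟩
  · rintro ⟨h1, h3⟩
    exact ⟨⟨h1, by have := Int.le_of_dvd (by omega) h3; omega⟩, h3⟩

lemma sorted_pvD (n : Int) : (pvD n).Pairwise (· < ·) :=
  (PySem.List.pairwise_lt_pyRange_one 1 (n + 1)).sublist List.filter_sublist

lemma nodup_pvD (n : Int) : (pvD n).Nodup :=
  (sorted_pvD n).imp ne_of_lt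

-- divisor-complement facts
lemma pvDivMul {n x : Int} (_hx1 : 1 ≤ x) (hd : x ∣ n) : x * (n / x) = n :=
  Int.mul_ediv_cancel' hd

lemma pvDivPos {n x : Int} (hn : 1 ≤ n) (hx1 : 1 ≤ x) (hd : x ∣ n) : 1 ≤ n / x := by
  have h := pvDivMul hx1 hd
  nlinarith [h]

lemma pvDivDvd {n x : Int} (hx1 : 1 ≤ x) (hd : x ∣ n) : (n / x) ∣ n :=
  ⟨x, by have := pvDivMul hx1 hd; linarith [this]⟩

lemma pvDivDiv {n x : Int} (hn : 1 ≤ n) (hx1 : 1 ≤ x) (hd : x ∣ n) : n / (n / x) = x := by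
  have h := pvDivMul hx1 hd
  have hpos := pvDivPos hn hx1 hd
  calc n / (n / x) = ((n / x) * x) / (n / x) := by rw [mul_comm, h]
    _ = x := Int.mul_ediv_cancel_left x (by omega)

lemma pvDivAnti {n x y : Int} (hn : 1 ≤ n) (hx1 : 1 ≤ x) (hdx : x ∣ n)
    (hy1 : 1 ≤ y) (hdy : y ∣ n) (hxy : x < y) : n / y < n / x := by
  have hx := pvDivMul hx1 hdx
  have hy := pvDivMul hy1 hdy
  have hpx := pvDivPos hn hx1 hdx
  nlinarith

-- the central pairing: reversing the divisor list divides each element into n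
lemma rev_pvD {n : Int} (hn : 1 ≤ n) :
    (pvD n).reverse = (pvD n).map (fun x => n / x) := by
  have hperm : List.Perm ((pvD n).reverse) ((pvD n).map (fun x => n / x)) := by
    apply (List.perm_ext_iff_of_nodup (List.nodup_reverse.mpr (nodup_pvD n)) ?_).mpr
    · intro x
      simp only [List.mem_reverse, List.mem_map, mem_pvD hn]
      constructor
      · rintro ⟨h1, hd⟩
        exact ⟨n / x, ⟨pvDivPos hn h1 hd, pvDivDvd h1 hd⟩, pvDivDiv hn h1 hd⟩
      · rintro ⟨y, ⟨hy1, hyd⟩, rfl⟩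
        exact ⟨pvDivPos hn hy1 hyd, pvDivDvd hy1 hyd⟩
    · -- map is nodup: the complement map is injective on divisors
      apply (List.nodup_map_iff_inj_on (nodup_pvD n)).mpr
      intro x hx y hy hxy
      rw [mem_pvD hn] at hx hy
      have := pvDivDiv hn hx.1 hx.2
      rw [hxy, pvDivDiv hn hy.1 hy.2] at this
      omega
  refine List.Perm.eq_of_pairwise' (r := (· ≥ ·)) ?_ ?_ hperm
  · exact List.pairwise_reverse.mpr ((sorted_pvD n).imp (fun h => le_of_lt h))
  · rw [List.pairwise_map]
    refine List.Pairwise.imp_of_mem ?_ (sorted_pvD n)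
    intro a b ha hb hab
    rw [mem_pvD hn] at ha hb
    exact le_of_lt (pvDivAnti hn ha.1 ha.2 hb.1 hb.2 hab)

-- getElem form of the pairing
lemma pair_pvD {n : Int} (hn : 1 ≤ n) {k : Nat} (hk : k < (pvD n).length) :
    (pvD n)[(pvD n).length - 1 - k]'(by omega) = n / (pvD n)[k] := by
  have h := rev_pvD hn
  have h1 : (pvD n).reverse[k]'(by simpa using hk) =
      ((pvD n).map (fun x => n / x))[k]'(by simpa using hk) := by
    simp only [h]
  simpa [List.getElem_reverse, List.getElem_map] using h1


-- B's loop computes the largest divisor d of n with d * d ≤ n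
lemma altLoop_inv (n : Int) : ∀ (i d : Int), 1 ≤ i → 1 ≤ d → d ∣ n → d * d ≤ n →
    (∀ j, d < j → j < i → j * j ≤ n → ¬ j ∣ n) →
    (1 ≤ altLoop n i d ∧ altLoop n i d ∣ n ∧ altLoop n i d * altLoop n i d ≤ n ∧
      ∀ j, altLoop n i d < j → j * j ≤ n → ¬ j ∣ n) := by
  intro i d
  induction i, d using altLoop.induct n with
  | case1 i d hle ih =>
    intro hi hd hdvd hdd hmax
    rw [altLoop, dif_pos hle]
    by_cases hmod : (PySem.Int.mod n i == 0) = true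
    · simp only [dif_pos hmod] at ih; rw [if_pos hmod]
      have hidvd : i ∣ n := by
        rwa [beq_iff_eq, PySem.Int.mod_eq_zero_iff_dvd] at hmod
      refine ih (by omega) hi hidvd hle ?_
      intro j h1 h2; omega
    · simp only [dif_neg hmod] at ih; rw [if_neg hmod]
      have hindvd : ¬ i ∣ n := by
        rw [beq_iff_eq, PySem.Int.mod_eq_zero_iff_dvd] at hmod; exact hmod
      refine ih (by omega) hd hdvd hdd ?_
      intro j hj1 hj2 hjj hjdvd
      by_cases hji : j < i
      · exact hmax j hj1 hji hjj hjdvd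
      · have : j = i := by omega
        exact hindvd (this ▸ hjdvd)
  | case2 i d hle =>
    intro hi hd hdvd hdd hmax
    rw [altLoop, dif_neg hle]
    refine ⟨hd, hdvd, hdd, ?_⟩
    intro j hj hjj hjdvd
    by_cases hji : j < i
    · exact hmax j hj hji hjj hjdvd
    · have : i ≤ j := by omega
      nlinarith

lemma len_pos_pvD {n : Int} (hn : 1 ≤ n) : 0 < (pvD n).length :=
  List.length_pos_of_mem ((mem_pvD hn).mpr ⟨le_refl 1, one_dvd n⟩)

-- the middle element of the divisor list is the largest divisor m with m * m ≤ n
lemma mid_pvD {n : Int} (hn : 1 ≤ n) {k : Nat} (hkeq : k = ((pvD n).length - 1) / 2)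
    (hk : k < (pvD n).length) :
    1 ≤ (pvD n)[k] ∧ (pvD n)[k] ∣ n ∧ (pvD n)[k] * (pvD n)[k] ≤ n ∧
      ∀ j, (pvD n)[k] < j → j * j ≤ n → ¬ j ∣ n := by
  have hmono := List.pairwise_iff_getElem.mp (sorted_pvD n)
  obtain ⟨h1, hdvd⟩ := (mem_pvD hn).mp (List.getElem_mem hk)
  have hpair := pair_pvD hn hk
  have hmm := pvDivMul h1 hdvd
  refine ⟨h1, hdvd, ?_, ?_⟩
  · rcases Nat.lt_or_ge k ((pvD n).length - 1 - k) with hlt | hge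
    · have := hmono k ((pvD n).length - 1 - k) hk (by omega) hlt
      rw [hpair] at this
      nlinarith
    · have hkk : (pvD n).length - 1 - k = k := by omega
      simp only [hkk] at hpair
      nlinarith
  · intro j hj hjj hjdvd
    have hj1 : 1 ≤ j := by omega
    obtain ⟨p, hp, hpe⟩ := List.getElem_of_mem ((mem_pvD hn).mpr ⟨hj1, hjdvd⟩)
    have hkp : k < p := by
      by_contra hc
      push_neg at hc
      rcases Nat.lt_or_ge p k with hlt | hge
      · have hh := hmono p k hp hk hlt
        rw [hpe] at hh
        omega
      · have hpk : p = k := by omega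
        subst hpk
        rw [hpe] at hj
        omega
    have hpd := pair_pvD hn hp
    have hlt2 : (pvD n)[(pvD n).length - 1 - p]'(by omega) < (pvD n)[p] :=
      hmono _ _ (by omega) hp (by omega)
    have hjm := pvDivMul hj1 hjdvd
    rw [hpd, hpe] at hlt2
    nlinarith

lemma max_div_unique {n m1 m2 : Int}
    (h1 : 1 ≤ m1 ∧ m1 ∣ n ∧ m1 * m1 ≤ n ∧ ∀ j, m1 < j → j * j ≤ n → ¬ j ∣ n)
    (h2 : 1 ≤ m2 ∧ m2 ∣ n ∧ m2 * m2 ≤ n ∧ ∀ j, m2 < j → j * j ≤ n → ¬ j ∣ n) :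
    m1 = m2 := by
  rcases lt_trichotomy m1 m2 with h | h | h
  · exact absurd h2.2.1 (fun _ => h1.2.2.2 m2 h h2.2.2.1 h2.2.1)
  · exact h
  · exact absurd h1.2.1 (fun _ => h2.2.2.2 m1 h h1.2.2.1 h1.2.1)

-- ===== VERDICT (by name: the statement is the Claim_ definition above) =====
theorem solution_spec : Claim_equal_solution := by
  intro brown yellow _ hpre
  have hn : (1 : Int) ≤ brown + yellow := hpre
  unfold Spec_solution solution solution_alt
  simp only [pvD_fold]
  set n := brown + yellow with hndef
  set L := (pvD n).length with hLdef
  have hL : 0 < L := len_pos_pvD hn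
  have hk : (L - 1) / 2 < L := by omega
  have hmid := mid_pvD hn (k := (L - 1) / 2) rfl hk
  have hloop := altLoop_inv n 1 1 (le_refl 1) (le_refl 1) (one_dvd n) (by nlinarith)
    (by intro j h1 h2; omega)
  have hma : altLoop n 1 1 = (pvD n)[(L - 1) / 2] := max_div_unique hloop hmid
  have hfd : PySem.Int.floordiv n (altLoop n 1 1) = n / (pvD n)[(L - 1) / 2] := by
    rw [hma]
    exact PySem.Int.floordiv_eq_ediv_of_pos (by have := hmid.1; omega)
  rw [hfd, hma]
  split_ifs with hpar
  · -- even number of divisors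
    have hpar' : (L : Int) % 2 = 0 := by rwa [beq_iff_eq] at hpar
    rw [PySem.List.pyGet?_eq_some_getElem (pvD n) (i := (L : Int) / 2) (by omega)
          (by omega),
        PySem.List.pyGet?_eq_some_getElem (pvD n) (i := (L : Int) / 2 - 1) (by omega)
          (by omega)]
    simp only [Option.getD_some]
    have h1 : ((L : Int) / 2).toNat = L - 1 - (L - 1) / 2 := by omega
    have h2 : ((L : Int) / 2 - 1).toNat = (L - 1) / 2 := by omega
    have hpair := pair_pvD hn hk
    simp only [← hLdef] at hpair
    simp only [h1, h2, hpair]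
  · -- odd number of divisors
    have hpar' : (L : Int) % 2 = 1 := by
      rw [beq_iff_eq] at hpar; omega
    rw [PySem.List.pyGet?_eq_some_getElem (pvD n) (i := ((L : Int) - 1) / 2) (by omega)
          (by omega)]
    simp only [Option.getD_some]
    have h1 : (((L : Int) - 1) / 2).toNat = (L - 1) / 2 := by omega
    have h2 : L - 1 - (L - 1) / 2 = (L - 1) / 2 := by omega
    have hpair := pair_pvD hn hk
    simp only [← hLdef] at hpair
    simp only [h2] at hpair
    simp only [h1, ← hpair]
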